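-- pv_equiv track=rewrite | github.com/dryeab/competitive-programming | Leetcode/A. Download More RAM.py | solution
-- ===== SOURCE A (Python) =====
-- from collections import Counter
--
-- def solution(a, b, k):
--
--     store = Counter()
--     for i in range(len(b)):
--         store[(b[i], a[i])] += 1
--
--     while store:
--
--         M = (0, 0)
--
--         for piece in store:
--             if piece[1] <= k:
--                 M = max(M, piece)
--
--         if M == (0, 0):
--             return k
--
--         store[M] -= 1
--         if store[M] == 0:
--             store.pop(M)
--         k += M[0]
--
--     return k
-- ===== SOURCE B (Python) =====
-- def solution(a, b, k):
--     # Sort upgrades by cost; one pass suffices: once an upgrade is unaffordable,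
--     # every later (costlier) one stays unaffordable because k no longer grows.
--     for cost, gain in sorted(zip(a, b)):
--         if cost <= k and gain > 0:
--             k += gain
--     return k
-- ===== Notes on version B (the rewrite author's own statement) =====
-- stated objective: faster
-- what changed: A builds a Counter of (gain,cost) pieces and, in a while-loop, rescans all remaining pieces for the lexicographically largest affordable one before buying it; B sorts the (cost,gain) pairs once and accumulates every affordable positive gain in a single pass, which is equivalent because buying only increases k so the set of eventually-affordable pieces is order-independent.
import Mathlib
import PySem

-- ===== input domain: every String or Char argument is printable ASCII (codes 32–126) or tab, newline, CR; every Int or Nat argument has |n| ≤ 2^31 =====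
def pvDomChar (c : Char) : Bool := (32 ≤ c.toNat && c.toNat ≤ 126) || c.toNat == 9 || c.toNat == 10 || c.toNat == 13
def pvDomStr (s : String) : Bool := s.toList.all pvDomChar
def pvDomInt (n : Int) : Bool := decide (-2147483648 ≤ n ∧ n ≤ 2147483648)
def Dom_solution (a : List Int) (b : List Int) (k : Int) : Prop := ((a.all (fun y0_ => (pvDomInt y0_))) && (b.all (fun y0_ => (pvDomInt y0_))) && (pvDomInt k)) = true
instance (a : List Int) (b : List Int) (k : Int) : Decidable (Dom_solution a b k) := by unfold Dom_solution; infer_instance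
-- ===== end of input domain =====

-- B replaces A's quadratic rescan-for-the-best-affordable-piece loop by one sort of the
-- (cost, gain) pairs and a single accumulating pass (objective: faster).

-- ===== PORT A =====
-- Python max(x, y) on int pairs: lexicographic tuple comparison, returns x on ties
def pyMaxPair (x y : Int × Int) : Int × Int :=
  if x.1 < y.1 ∨ (x.1 = y.1 ∧ x.2 < y.2) then y else x

-- 'M = (0,0); for piece in store: if piece[1] <= k: M = max(M, piece)'
def bestAffordable (keys : List (Int × Int)) (k : Int) : Int × Int :=
  keys.foldl (fun M piece => if piece.2 ≤ k then pyMaxPair M piece else M) (0, 0)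

-- the 'while store:' loop; fuel ≥ total multiplicity + 1 so the fuel guard is never hit
def loopA (fuel : Nat) (store : PySem.Dict (Int × Int) Int) (k : Int) : Int :=
  match fuel with
  | 0 => k
  | fuel + 1 =>
    if store.items.isEmpty then k
    else
      let M := bestAffordable store.keys k
      if M = (0, 0) then k
      else
        let s1 := store.modify M 0 (· - 1)          -- store[M] -= 1
        let s2 := if s1.getD M 0 = 0 then s1.erase M else s1   -- if store[M] == 0: store.pop(M)
        loopA fuel s2 (k + M.1)

def solution (a : List Int) (b : List Int) (k : Int) : Int :=
  -- store = Counter(); for i in range(len(b)): store[(b[i], a[i])] += 1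
  -- (pyGetD: under Pre_ every index is in range, so the default is never used)
  let store := (PySem.List.pyRange 0 (b.length : Int) 1).foldl
    (fun d i => d.modify (PySem.List.pyGetD b i 0, PySem.List.pyGetD a i 0) 0 (· + 1))
    PySem.Dict.empty
  loopA (b.length + 1) store k

-- ===== PORT B =====
-- 'if cost <= k and gain > 0: k += gain'
def stepB (k : Int) (p : Int × Int) : Int := if p.1 ≤ k ∧ 0 < p.2 then k + p.2 else k

def solution_alt (a : List Int) (b : List Int) (k : Int) : Int :=
  -- for cost, gain in sorted(zip(a, b)): …   (sorted of int pairs = lexicographic)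
  (PySem.List.sorted2 (a.zip b) Prod.fst Prod.snd).foldl stepB k

-- ===== PRECONDITION & SPEC =====
-- Pre_ excludes exactly the inputs with len(b) > len(a), on which A raises IndexError at a[i].
def Pre_solution (a : List Int) (b : List Int) (k : Int) : Prop := b.length ≤ a.length

instance (a : List Int) (b : List Int) (k : Int) : Decidable (Pre_solution a b k) := by
  unfold Pre_solution; infer_instance

def pvWitness_solution : List Int × List Int × Int := ([1, 2], [3, 4], 1)

def Spec_solution (a : List Int) (b : List Int) (k : Int) (out : Int) : Prop := out = solution_alt a b k
instance (a : List Int) (b : List Int) (k : Int) (out : Int) : Decidable (Spec_solution a b k out) := by unfold Spec_solution; infer_instance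

-- ===== CLAIM (what is proved, stated in full; the proofs are below) =====
def Claim_equal_solution : Prop := ∀ (a : List Int) (b : List Int) (k : Int), Dom_solution a b k → Pre_solution a b k → Spec_solution a b k (solution a b k)

-- ===== LEMMAS AND PROOFS =====

-- lexicographic ≤ on int pairs
def lexle (x y : Int × Int) : Prop := x.1 < y.1 ∨ (x.1 = y.1 ∧ x.2 ≤ y.2)

theorem lexle_refl (x : Int × Int) : lexle x x := by unfold lexle; omega

theorem lexle_trans {x y z : Int × Int} (h1 : lexle x y) (h2 : lexle y z) : lexle x z := by
  unfold lexle at *; omega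

theorem lexle_pyMax_left (x y : Int × Int) : lexle x (pyMaxPair x y) := by
  unfold pyMaxPair; split <;> [skip; exact lexle_refl x]
  · rename_i h; unfold lexle; omega

theorem lexle_pyMax_right (x y : Int × Int) : lexle y (pyMaxPair x y) := by
  unfold pyMaxPair; split <;> [exact lexle_refl y; skip]
  · rename_i h; unfold lexle; omega

theorem pyMax_cases (x y : Int × Int) : pyMaxPair x y = x ∨ pyMaxPair x y = y := by
  unfold pyMaxPair; split <;> simp

-- generalized fold used by bestAffordable
theorem ba_ge (keys : List (Int × Int)) (k : Int) (M0 : Int × Int) :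
    lexle M0 (keys.foldl (fun M piece => if piece.2 ≤ k then pyMaxPair M piece else M) M0) := by
  induction keys generalizing M0 with
  | nil => exact lexle_refl M0
  | cons p t ih =>
    simp only [List.foldl_cons]
    refine lexle_trans (y := if p.2 ≤ k then pyMaxPair M0 p else M0) ?_ (ih _)
    split
    · exact lexle_pyMax_left M0 p
    · exact lexle_refl M0

theorem ba_mem (keys : List (Int × Int)) (k : Int) (M0 : Int × Int) :
    keys.foldl (fun M piece => if piece.2 ≤ k then pyMaxPair M piece else M) M0 = M0 ∨
    ((keys.foldl (fun M piece => if piece.2 ≤ k then pyMaxPair M piece else M) M0) ∈ keys ∧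
      (keys.foldl (fun M piece => if piece.2 ≤ k then pyMaxPair M piece else M) M0).2 ≤ k) := by
  induction keys generalizing M0 with
  | nil => exact Or.inl rfl
  | cons p t ih =>
    simp only [List.foldl_cons]
    rcases ih (if p.2 ≤ k then pyMaxPair M0 p else M0) with h | ⟨hmem, hle⟩
    · rw [h]
      split
      · rename_i hpk
        rcases pyMax_cases M0 p with h' | h'
        · exact Or.inl h'
        · exact Or.inr ⟨by rw [h']; exact List.mem_cons_self, by rw [h']; exact hpk⟩
      · exact Or.inl rfl
    · exact Or.inr ⟨List.mem_cons_of_mem _ hmem, hle⟩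

theorem ba_ub (keys : List (Int × Int)) (k : Int) (M0 : Int × Int) :
    ∀ p ∈ keys, p.2 ≤ k →
      lexle p (keys.foldl (fun M piece => if piece.2 ≤ k then pyMaxPair M piece else M) M0) := by
  induction keys generalizing M0 with
  | nil => intro p hp; exact absurd hp (by simp)
  | cons q t ih =>
    intro p hp hpk
    simp only [List.foldl_cons]
    rcases List.mem_cons.mp hp with rfl | hp'
    · refine lexle_trans ?_ (ba_ge t k _)
      rw [if_pos hpk]
      exact lexle_pyMax_right M0 p
    · exact ih _ p hp' hpk

-- ---- properties of B's pass ----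
theorem runB_frozen (l : List (Int × Int)) (k : Int)
    (h : ∀ p ∈ l, ¬ (p.1 ≤ k ∧ 0 < p.2)) : l.foldl stepB k = k := by
  induction l with
  | nil => rfl
  | cons x t ih =>
    simp only [List.foldl_cons]
    rw [show stepB k x = k from by unfold stepB; rw [if_neg (h x List.mem_cons_self)]]
    exact ih (fun p hp => h p (List.mem_cons_of_mem _ hp))

theorem runB_skip (l : List (Int × Int)) (k : Int) (v : Int × Int)
    (hv : v ∈ l) (hg : v.2 ≤ 0) : (l.erase v).foldl stepB k = l.foldl stepB k := by
  induction l generalizing k with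
  | nil => exact absurd hv (by simp)
  | cons x t ih =>
    rw [List.erase_cons]
    by_cases hx : x = v
    · subst hx
      rw [if_pos (by simp), List.foldl_cons,
        show stepB k x = k from by unfold stepB; rw [if_neg (by omega)]]
    · rw [if_neg (by simp [hx]), List.foldl_cons, List.foldl_cons]
      exact ih _ (List.mem_of_ne_of_mem (fun h => hx h.symm) hv)

theorem runB_exch (l : List (Int × Int)) (k : Int) (v : Int × Int)
    (hs : l.Pairwise (fun p q => p.1 ≤ q.1)) (hv : v ∈ l) (ha : v.1 ≤ k) (hg : 0 < v.2) :
    l.foldl stepB k = (l.erase v).foldl stepB (k + v.2) := by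
  induction l generalizing k with
  | nil => exact absurd hv (by simp)
  | cons x t ih =>
    rw [List.erase_cons]
    rcases List.pairwise_cons.mp hs with ⟨hx, ht⟩
    by_cases hxv : x = v
    · subst hxv
      rw [if_pos (by simp), List.foldl_cons,
        show stepB k x = k + x.2 from by unfold stepB; rw [if_pos ⟨ha, hg⟩]]
    · have hvt : v ∈ t := List.mem_of_ne_of_mem (fun h => hxv h.symm) hv
      have hx1 : x.1 ≤ k := le_trans (hx v hvt) ha
      rw [if_neg (by simp [hxv]), List.foldl_cons, List.foldl_cons]
      by_cases hx2 : 0 < x.2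
      · rw [show stepB k x = k + x.2 from by unfold stepB; rw [if_pos ⟨hx1, hx2⟩],
          show stepB (k + v.2) x = k + v.2 + x.2 from by
            unfold stepB; rw [if_pos ⟨by omega, hx2⟩]]
        rw [show k + v.2 + x.2 = k + x.2 + v.2 from by ring]
        exact ih _ ht hvt (by omega)
      · rw [show stepB k x = k from by unfold stepB; rw [if_neg (by omega)],
          show stepB (k + v.2) x = k + v.2 from by unfold stepB; rw [if_neg (by omega)]]
        exact ih _ ht hvt ha

-- ---- sorted2 is sorted on the first component ----
def befLex (x y : Int × Int) : Bool :=
  decide (x.1 < y.1) || (!decide (y.1 < x.1) && decide (x.2 < y.2))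

theorem befLex_asymm {x y : Int × Int} (h : befLex x y = true) : befLex y x = false := by
  simp [befLex] at *; omega

theorem befLex_forward {x y z : Int × Int} (h1 : befLex x y = true)
    (h2 : befLex z y = false) : befLex z x = false := by
  simp [befLex] at *; omega

theorem insertBy_pairwise (x : Int × Int) (ys : List (Int × Int))
    (h : ys.Pairwise (fun a b => befLex b a = false)) :
    (PySem.List.insertBy befLex x ys).Pairwise (fun a b => befLex b a = false) := by
  induction ys with
  | nil => simp [PySem.List.insertBy]
  | cons y t ih =>
    rcases List.pairwise_cons.mp h with ⟨hy, ht⟩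
    by_cases hb : befLex x y = true
    · rw [show PySem.List.insertBy befLex x (y :: t) = x :: y :: t from by
        simp [PySem.List.insertBy, hb]]
      refine List.pairwise_cons.mpr ⟨?_, h⟩
      intro z hz
      rcases List.mem_cons.mp hz with rfl | hzt
      · exact befLex_asymm hb
      · exact befLex_forward hb (hy z hzt)
    · rw [show PySem.List.insertBy befLex x (y :: t) = y :: PySem.List.insertBy befLex x t from by
        simp [PySem.List.insertBy, hb]]
      refine List.pairwise_cons.mpr ⟨?_, ih ht⟩
      intro z hz
      rcases (PySem.List.mem_insertBy _ _ _ _).mp hz with rfl | hzt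
      · simpa using hb
      · exact hy z hzt

theorem foldl_insertBy_pairwise (xs acc : List (Int × Int))
    (h : acc.Pairwise (fun a b => befLex b a = false)) :
    (xs.foldl (fun acc x => PySem.List.insertBy befLex x acc) acc).Pairwise
      (fun a b => befLex b a = false) := by
  induction xs generalizing acc with
  | nil => exact h
  | cons x t ih => exact ih _ (insertBy_pairwise x acc h)

theorem sorted2_pairwise_fst (xs : List (Int × Int)) :
    (PySem.List.sorted2 xs Prod.fst Prod.snd).Pairwise (fun p q => p.1 ≤ q.1) := by
  have heq : PySem.List.sorted2 xs Prod.fst Prod.snd =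
      xs.foldl (fun acc x => PySem.List.insertBy befLex x acc) [] := rfl
  rw [heq]
  refine (foldl_insertBy_pairwise xs [] (by simp)).imp ?_
  intro a b hab
  simp [befLex] at hab
  omega

-- ---- multiset represented by the counter ----
def flipP (p : Int × Int) : Int × Int := (p.2, p.1)

def mulD (d : PySem.Dict (Int × Int) Int) : List (Int × Int) :=
  d.items.flatMap (fun pc => List.replicate pc.2.toNat pc.1)

theorem mem_mulD {d : PySem.Dict (Int × Int) Int} {x : Int × Int} (h : x ∈ mulD d) :
    x ∈ d.keys := by
  simp only [mulD, List.mem_flatMap] at h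
  obtain ⟨pc, hpc, hx⟩ := h
  have hx' := List.eq_of_mem_replicate hx
  subst hx'
  exact List.mem_map.mpr ⟨pc, hpc, rfl⟩

theorem count_mulD (d : PySem.Dict (Int × Int) Int) (hnd : d.keys.Nodup) (q : Int × Int) :
    (mulD d).count q = (d.getD q 0).toNat := by
  obtain ⟨l⟩ := d
  induction l with
  | nil => simp [mulD, PySem.Dict.getD, PySem.Dict.get?]
  | cons pc t ih =>
    obtain ⟨pk, c⟩ := pc
    simp only [PySem.Dict.keys, List.map_cons, List.nodup_cons] at hnd
    obtain ⟨hout, hndt⟩ := hnd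
    have hmul : mulD ⟨(pk, c) :: t⟩ = List.replicate c.toNat pk ++ mulD ⟨t⟩ := by
      simp [mulD]
    rw [hmul, List.count_append, List.count_replicate]
    have hget : (PySem.Dict.mk ((pk, c) :: t)).getD q 0 =
        if (pk == q) = true then c else (PySem.Dict.mk t).getD q 0 := by
      simp only [PySem.Dict.getD, PySem.Dict.get?_mk_cons]
      split <;> rfl
    rw [hget]
    by_cases hpq : pk = q
    · rw [if_pos (by simpa using hpq), if_pos (by simpa using hpq)]
      have hz : (mulD ⟨t⟩).count q = 0 := by
        rw [List.count_eq_zero]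
        intro hmem
        have := mem_mulD (d := ⟨t⟩) hmem
        simp only [PySem.Dict.keys] at this
        rw [hpq] at hout
        exact hout this
      rw [hz]
      simp
    · rw [if_neg (by simpa using hpq), if_neg (by simpa using hpq), Nat.zero_add]
      exact ih (by simpa [PySem.Dict.keys] using hndt)

theorem erase_get? (d : PySem.Dict (Int × Int) Int) (M q : Int × Int) :
    (d.erase M).get? q = if q = M then none else d.get? q := by
  obtain ⟨l⟩ := d
  induction l with
  | nil => simp [PySem.Dict.erase, PySem.Dict.get?]
  | cons p t ih =>
    obtain ⟨pk, v⟩ := p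
    by_cases hpM : pk = M
    · have hfilter : (PySem.Dict.mk ((pk, v) :: t)).erase M = (PySem.Dict.mk t).erase M := by
        simp [PySem.Dict.erase, hpM]
      rw [hfilter, ih]
      by_cases hq : q = M
      · rw [if_pos hq, if_pos hq]
      · rw [if_neg hq, if_neg hq, PySem.Dict.get?_mk_cons,
          if_neg (by simp; intro h; exact hq (by rw [← h, hpM]))]
    · have hfilter : (PySem.Dict.mk ((pk, v) :: t)).erase M =
          PySem.Dict.mk ((pk, v) :: ((PySem.Dict.mk t).erase M).items) := by
        simp [PySem.Dict.erase, hpM]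
      rw [hfilter]
      by_cases hpq : pk = q
      · have hqM : ¬ q = M := fun h => hpM (by rw [hpq, h])
        rw [PySem.Dict.get?_mk_cons, if_pos (by simpa using hpq), if_neg hqM,
          PySem.Dict.get?_mk_cons, if_pos (by simpa using hpq)]
      · rw [PySem.Dict.get?_mk_cons, if_neg (by simpa using hpq)]
        have hmk : PySem.Dict.mk ((PySem.Dict.mk t).erase M).items = (PySem.Dict.mk t).erase M := rfl
        rw [hmk, ih]
        by_cases hq : q = M
        · rw [if_pos hq, if_pos hq]
        · rw [if_neg hq, if_neg hq, PySem.Dict.get?_mk_cons, if_neg (by simpa using hpq)]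

theorem erase_keys_sublist (d : PySem.Dict (Int × Int) Int) (M : Int × Int) :
    (d.erase M).keys.Sublist d.keys :=
  List.Sublist.map _ List.filter_sublist

theorem erase_getD (d : PySem.Dict (Int × Int) Int) (M q : Int × Int) :
    (d.erase M).getD q 0 = if q = M then 0 else d.getD q 0 := by
  simp only [PySem.Dict.getD, erase_get?]
  split <;> rfl

-- the effect of 'store[M] -= 1; if store[M] == 0: store.pop(M)'
def stepStore (store : PySem.Dict (Int × Int) Int) (M : Int × Int) :
    PySem.Dict (Int × Int) Int :=
  if (store.modify M 0 (· - 1)).getD M 0 = 0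
    then (store.modify M 0 (· - 1)).erase M
    else store.modify M 0 (· - 1)

theorem step_facts (store : PySem.Dict (Int × Int) Int) (M : Int × Int)
    (hnd : store.keys.Nodup) (hcnt : ∀ p ∈ store.keys, 1 ≤ store.getD p 0)
    (hM : M ∈ store.keys) :
    (stepStore store M).keys.Nodup ∧
      (∀ p ∈ (stepStore store M).keys, 1 ≤ (stepStore store M).getD p 0) ∧
      (mulD store).Perm (M :: mulD (stepStore store M)) := by
  have hcont : store.contains M = true := (PySem.Dict.contains_iff_mem_keys store M).mpr hM
  have hc1 : 1 ≤ store.getD M 0 := hcnt M hM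
  have hs1 : store.modify M 0 (· - 1) = store.insert M (store.getD M 0 - 1) := rfl
  have hk1 : (store.modify M 0 (· - 1)).keys = store.keys := by
    rw [hs1]; exact PySem.Dict.keys_insert_of_contains store _ hcont
  have hg1 : ∀ q, (store.modify M 0 (· - 1)).getD q 0 =
      if q = M then store.getD M 0 - 1 else store.getD q 0 := by
    intro q; rw [hs1]; exact PySem.Dict.getD_insert store M q _ 0
  have hnd1 : (store.modify M 0 (· - 1)).keys.Nodup := by rw [hk1]; exact hnd
  by_cases hz : (store.modify M 0 (· - 1)).getD M 0 = 0
  · have hs2 : stepStore store M = (store.modify M 0 (· - 1)).erase M := by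
      unfold stepStore; rw [if_pos hz]
    have hcM : store.getD M 0 = 1 := by have := hg1 M; rw [if_pos rfl] at this; omega
    have hnd2 : (stepStore store M).keys.Nodup := by
      rw [hs2]; exact (List.Nodup.sublist (erase_keys_sublist _ M) hnd1)
    have hg2 : ∀ q, (stepStore store M).getD q 0 =
        if q = M then 0 else store.getD q 0 := by
      intro q
      rw [hs2, erase_getD, hg1]
      by_cases hq : q = M
      · rw [if_pos hq, if_pos hq]
      · rw [if_neg hq, if_neg hq, if_neg hq]
    refine ⟨hnd2, ?_, ?_⟩
    · intro p hp
      have hpM : p ≠ M := by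
        intro h
        have hgn : (stepStore store M).get? M = none := by
          rw [hs2, erase_get?, if_pos rfl]
        exact (PySem.Dict.get?_eq_none_iff_not_mem_keys _ _).mp hgn (h ▸ hp)
      have hps : p ∈ store.keys := by
        have := (erase_keys_sublist (store.modify M 0 (· - 1)) M).subset
        rw [← hk1]; exact this (by rw [← hs2]; exact hp)
      rw [hg2, if_neg hpM]
      exact hcnt p hps
    · rw [List.perm_iff_count]
      intro q
      rw [count_mulD store hnd q, List.count_cons, count_mulD _ hnd2 q, hg2]
      by_cases hq : q = M
      · subst hq
        rw [if_pos rfl, if_pos (by simp), hcM]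
        omega
      · rw [if_neg hq, if_neg (by simp only [beq_iff_eq]; exact fun h => hq h.symm),
          Nat.add_zero]
  · have hs2 : stepStore store M = store.modify M 0 (· - 1) := by
      unfold stepStore; rw [if_neg hz]
    have hcM : 2 ≤ store.getD M 0 := by have := hg1 M; rw [if_pos rfl] at this; omega
    have hnd2 : (stepStore store M).keys.Nodup := by rw [hs2]; exact hnd1
    refine ⟨hnd2, ?_, ?_⟩
    · intro p hp
      rw [hs2, hg1]
      by_cases hq : p = M
      · rw [if_pos hq]; omega
      · rw [if_neg hq]
        exact hcnt p (by rw [hs2, hk1] at hp; exact hp)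
    · rw [List.perm_iff_count]
      intro q
      rw [count_mulD store hnd q, List.count_cons, count_mulD _ hnd2 q, hs2, hg1]
      by_cases hq : q = M
      · subst hq
        rw [if_pos rfl, if_pos (by simp)]
        omega
      · rw [if_neg hq, if_neg (by simp only [beq_iff_eq]; exact fun h => hq h.symm),
          Nat.add_zero]

-- ---- the main loop invariant ----
theorem loopA_eq (fuel : Nat) : ∀ (store : PySem.Dict (Int × Int) Int) (k : Int) (L : List (Int × Int)),
    store.keys.Nodup → (∀ p ∈ store.keys, 1 ≤ store.getD p 0) →
    (mulD store).length ≤ fuel → L.Perm ((mulD store).map flipP) →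
    L.Pairwise (fun p q => p.1 ≤ q.1) →
    loopA fuel store k = L.foldl stepB k := by
  induction fuel with
  | zero =>
    intro store k L hnd hcnt hlen hp hpw
    have hmul : mulD store = [] := List.eq_nil_of_length_eq_zero (Nat.le_zero.mp hlen)
    have hL : L = [] := List.Perm.eq_nil (by rw [hmul] at hp; simpa using hp)
    rw [hL]; rfl
  | succ fuel ih =>
    intro store k L hnd hcnt hlen hp hpw
    by_cases hemp : store.items.isEmpty
    · have hitems : store.items = [] := List.isEmpty_iff.mp hemp
      have hmul : mulD store = [] := by simp [mulD, hitems]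
      have hL : L = [] := List.Perm.eq_nil (by rw [hmul] at hp; simpa using hp)
      rw [hL]
      simp [loopA, hemp]
    · have hemp' : store.items.isEmpty = false := by simpa using hemp
      by_cases hM0 : bestAffordable store.keys k = (0, 0)
      · -- no affordable positive piece: A returns k, B's pass adds nothing
        have hfoldl : L.foldl stepB k = k := by
          apply runB_frozen
          intro x hxL hcon
          have hxmap : x ∈ (mulD store).map flipP := hp.subset hxL
          obtain ⟨y, hy, rfl⟩ := List.mem_map.mp hxmap
          have hykeys : y ∈ store.keys := mem_mulD hy
          have hub := ba_ub store.keys k (0, 0) y hykeys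
            (by simpa [flipP] using hcon.1)
          have hub' : lexle y (0, 0) := by
            rw [show store.keys.foldl
                (fun M piece => if piece.2 ≤ k then pyMaxPair M piece else M) (0, 0) =
              bestAffordable store.keys k from rfl, hM0] at hub
            exact hub
          have hy1 : 0 < y.1 := by simpa [flipP] using hcon.2
          unfold lexle at hub'
          simp at hub'
          omega
        rw [hfoldl]
        simp [loopA, hemp', hM0]
      · -- buy the selected piece M
        set M := bestAffordable store.keys k with hMdef
        have hmem : M = (0, 0) ∨ (M ∈ store.keys ∧ M.2 ≤ k) := ba_mem store.keys k (0, 0)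
        obtain ⟨hMkeys, hMaff⟩ := hmem.resolve_left hM0
        have hge : lexle (0, 0) M := ba_ge store.keys k (0, 0)
        have hpos : 0 < M.1 ∨ (M.1 = 0 ∧ 0 < M.2) := by
          have hne : ¬ (M.1 = 0 ∧ M.2 = 0) := by
            intro h; exact hM0 (Prod.ext_iff.mpr ⟨h.1, h.2⟩)
          unfold lexle at hge
          simp at hge
          omega
        obtain ⟨hnd2, hcnt2, hperm⟩ := step_facts store M hnd hcnt hMkeys
        have hMin : M ∈ mulD store := by
          rw [← List.count_pos_iff, count_mulD store hnd M]
          have := hcnt M hMkeys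
          omega
        have hfM : flipP M ∈ L := hp.mem_iff.mpr (List.mem_map_of_mem hMin)
        have hperm' : (L.erase (flipP M)).Perm ((mulD (stepStore store M)).map flipP) := by
          have h1 : ((mulD store).map flipP).Perm
              (flipP M :: (mulD (stepStore store M)).map flipP) := by
            simpa using hperm.map flipP
          have h2 := (hp.trans h1).erase (flipP M)
          rwa [List.erase_cons_head] at h2
        have hpw' : (L.erase (flipP M)).Pairwise (fun p q => p.1 ≤ q.1) :=
          List.Pairwise.sublist List.erase_sublist hpw
        have hlen' : (mulD (stepStore store M)).length ≤ fuel := by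
          have := hperm.length_eq
          simp at this
          omega
        have hstep : loopA (fuel + 1) store k = loopA fuel (stepStore store M) (k + M.1) := by
          show (if store.items.isEmpty then k
            else
              let Mx := bestAffordable store.keys k
              if Mx = (0, 0) then k
              else
                let s1 := store.modify Mx 0 (· - 1)
                let s2 := if s1.getD Mx 0 = 0 then s1.erase Mx else s1
                loopA fuel s2 (k + Mx.1)) = _
          rw [hemp']
          simp only [Bool.false_eq_true, if_false]
          rw [← hMdef, if_neg hM0]
          rfl
        have hIH := ih (stepStore store M) (k + M.1) (L.erase (flipP M))
          hnd2 hcnt2 hlen' hperm' hpw'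
        rcases hpos with h1 | ⟨h10, h22⟩
        · rw [hstep, hIH,
            runB_exch L k (flipP M) hpw hfM (by simpa [flipP] using hMaff)
              (by simpa [flipP] using h1)]
          rfl
        · rw [hstep, hIH, h10, add_zero,
            ← runB_skip L k (flipP M) hfM (by simp [flipP, h10])]

-- ===== VERDICT (by name: the statement is the Claim_ definition above) =====
theorem key_list_eq_zip (a b : List Int) (hlen : b.length ≤ a.length) :
    ((PySem.List.pyRange 0 (b.length : Int) 1).map
      (fun i => (PySem.List.pyGetD b i 0, PySem.List.pyGetD a i 0))).map flipP = a.zip b := by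
  apply List.ext_getElem
  · simp [PySem.List.length_pyRange_one]
    omega
  · intro j h1 h2
    have hj : j < b.length := by
      simpa [PySem.List.length_pyRange_one] using h1
    have hja : j < a.length := lt_of_lt_of_le hj hlen
    simp only [List.getElem_map, List.getElem_zip, flipP]
    rw [PySem.List.getElem_pyRange_one 0 (b.length : Int) j
        (by simpa [PySem.List.length_pyRange_one] using hj)]
    simp only [zero_add, PySem.List.pyGetD_natCast]
    rw [List.getD_eq_getElem a 0 hja, List.getD_eq_getElem b 0 hj]

theorem solution_spec : Claim_equal_solution := by
  unfold Claim_equal_solution Spec_solution Pre_solution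
  intro a b k _ hlen
  have hK : solution a b k = loopA (b.length + 1)
      (PySem.Dict.counter ((PySem.List.pyRange 0 (b.length : Int) 1).map
        (fun i => (PySem.List.pyGetD b i 0, PySem.List.pyGetD a i 0)))) k := by
    unfold solution
    rw [PySem.Dict.counter_eq_foldl, List.foldl_map]
  set K : List (Int × Int) := (PySem.List.pyRange 0 (b.length : Int) 1).map
    (fun i => (PySem.List.pyGetD b i 0, PySem.List.pyGetD a i 0)) with hKdef
  have hnd := PySem.Dict.nodup_keys_counter K
  have hcnt : ∀ p ∈ (PySem.Dict.counter K).keys, 1 ≤ (PySem.Dict.counter K).getD p 0 := by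
    intro p hp
    rw [PySem.Dict.getD_counter]
    have hpK : p ∈ K := by
      rw [PySem.Dict.keys_counter] at hp
      exact (PySem.Set.mem_ofList K p).mp hp
    have := List.count_pos_iff.mpr hpK
    omega
  have hmulK : (mulD (PySem.Dict.counter K)).Perm K := by
    rw [List.perm_iff_count]
    intro q
    rw [count_mulD _ hnd q, PySem.Dict.getD_counter]
    simp
  have hflip : K.map flipP = a.zip b := key_list_eq_zip a b hlen
  have hL : (PySem.List.sorted2 (a.zip b) Prod.fst Prod.snd).Perm
      ((mulD (PySem.Dict.counter K)).map flipP) := by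
    refine (PySem.List.sorted2_perm (a.zip b) Prod.fst Prod.snd false).trans ?_
    rw [← hflip]
    exact (hmulK.map flipP).symm
  have hlenK : (mulD (PySem.Dict.counter K)).length ≤ b.length + 1 := by
    rw [hmulK.length_eq, hKdef]
    simp [PySem.List.length_pyRange_one]
  rw [hK]
  exact loopA_eq (b.length + 1) (PySem.Dict.counter K) k _ hnd hcnt hlenK hL
    (sorted2_pairwise_fst (a.zip b))
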